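-- pv_equiv track=rewrite | github.com/aleksandarperak33-hub/alekfi | alekfi/swarm/clinical_trials.py | _determine_significance
-- ===== SOURCE A (Python) =====
-- def _determine_significance(phases: list[str]) -> str:
--     """Assign significance based on trial phase.
--
--     Phase 3 completions are critical (market-moving).
--     Phase 2 completions are high (pipeline signal).
--     Everything else is medium.
--     """
--     for phase in phases:
--         upper = phase.upper()
--         if "3" in upper:
--             return "critical"
--     for phase in phases:
--         upper = phase.upper()
--         if "2" in upper:
--             return "high"
--     return "medium"
-- ===== SOURCE B (Python) =====
-- def _determine_significance(phases: list[str]) -> str: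
--     saw_two = False
--     for phase in phases:
--         upper = phase.upper()
--         if "3" in upper:
--             return "critical"
--         if "2" in upper:
--             saw_two = True
--     return "high" if saw_two else "medium"
-- ===== Notes on version B (the rewrite author's own statement) =====
-- stated objective: alternative
-- what changed: Replaces A's two sequential scans (one for '3', one for '2') with a single pass maintaining a saw_two flag, returning 'critical' immediately and deciding 'high' vs 'medium' after the loop.
import Mathlib
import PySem

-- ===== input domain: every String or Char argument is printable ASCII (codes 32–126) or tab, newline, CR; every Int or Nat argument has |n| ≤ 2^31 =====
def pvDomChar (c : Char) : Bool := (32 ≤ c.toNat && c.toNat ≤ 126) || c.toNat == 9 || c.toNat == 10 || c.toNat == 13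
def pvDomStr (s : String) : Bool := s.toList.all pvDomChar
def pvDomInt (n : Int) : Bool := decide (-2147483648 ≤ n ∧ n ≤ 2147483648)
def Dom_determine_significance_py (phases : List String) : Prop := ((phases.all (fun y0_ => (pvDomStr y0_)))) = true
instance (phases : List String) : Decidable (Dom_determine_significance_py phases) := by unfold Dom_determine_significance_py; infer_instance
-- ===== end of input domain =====

-- ===== PORT A =====
-- B replaces A's two sequential scans with a single pass keeping a saw_two flag (same cost, different decomposition).
-- first loop of A: returns some "critical" on the first phase whose uppercase contains "3"
def aLoop1 : List String → Option String
  | [] => none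
  | p :: r => if PySem.Str.isIn "3" (PySem.Str.upper p) then some "critical" else aLoop1 r

-- second loop of A: returns some "high" on the first phase whose uppercase contains "2"
def aLoop2 : List String → Option String
  | [] => none
  | p :: r => if PySem.Str.isIn "2" (PySem.Str.upper p) then some "high" else aLoop2 r

def determine_significance_py (phases : List String) : String :=
  match aLoop1 phases with
  | some s => s
  | none =>
    match aLoop2 phases with
    | some s => s
    | none => "medium"

-- ===== PORT B =====
-- single pass with the saw_two flag; "critical" returns immediately
def bLoop (saw : Bool) : List String → String
  | [] => if saw then "high" else "medium"
  | p :: r =>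
    let u := PySem.Str.upper p
    if PySem.Str.isIn "3" u then "critical"
    else bLoop (saw || PySem.Str.isIn "2" u) r

def determine_significance_py_alt (phases : List String) : String :=
  bLoop false phases

-- ===== PRECONDITION & SPEC =====
def Spec_determine_significance_py (phases : List String) (out : String) : Prop := out = determine_significance_py_alt phases
instance (phases : List String) (out : String) : Decidable (Spec_determine_significance_py phases out) := by unfold Spec_determine_significance_py; infer_instance

-- ===== CLAIM (what is proved, stated in full; the proofs are below) =====
def Claim_equal_determine_significance_py : Prop := ∀ (phases : List String), Dom_determine_significance_py phases → Spec_determine_significance_py phases (determine_significance_py phases)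

-- ===== LEMMAS AND PROOFS =====

lemma aLoop2_some {l : List String} {s : String} (h : aLoop2 l = some s) : s = "high" := by
  induction l with
  | nil => simp [aLoop2] at h
  | cons p r ih =>
    simp only [aLoop2] at h
    split at h
    · exact (Option.some_inj.mp h).symm
    · exact ih h

lemma bLoop_eq (l : List String) (saw : Bool) :
    bLoop saw l =
      match aLoop1 l with
      | some s => s
      | none => if saw || (aLoop2 l).isSome then "high" else "medium" := by
  induction l generalizing saw with
  | nil => simp [bLoop, aLoop1, aLoop2]
  | cons p r ih =>
    simp only [bLoop, aLoop1, aLoop2]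
    by_cases h3 : PySem.Chars.isIn ['3'] (PySem.Chars.upper p.toList) = true
    · simp [h3]
    · by_cases h2 : PySem.Chars.isIn ['2'] (PySem.Chars.upper p.toList) = true <;>
        simp [h3, h2, ih]

-- ===== VERDICT (by name: the statement is the Claim_ definition above) =====
theorem determine_significance_py_spec : Claim_equal_determine_significance_py := by
  intro phases _
  unfold Spec_determine_significance_py determine_significance_py determine_significance_py_alt
  rw [bLoop_eq]
  cases h1 : aLoop1 phases with
  | some s => rfl
  | none =>
    cases h2 : aLoop2 phases with
    | none => simp
    | some s => simp [aLoop2_some h2]
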